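-- pv_equiv track=rewrite | github.com/oussamaHadder/gwalaocrr | StringUtils.py | handle_store_name
-- ===== SOURCE A (Python) =====
-- def handle_store_name(lines_labels: list[list]):
--     first_company_line = None
--
--     for index, line in enumerate(lines_labels):
--         exit_loop = False
--         store_name_count = line.count('Store_name_value')
--         store_addr_count = line.count('Store_addr_value')
--         while 'Store_name_value' in line and exit_loop == False:
--             indx_store = line.index('Store_name_value')
--             if first_company_line is None :
--                 first_company_line = index
--             elif index - first_company_line >=2:
--                 line[indx_store] = 'Others'
--             else :
--                 exit_loop = True
--
--         while 'Store_addr_value' in line and 'Store_name_value' in line and exit_loop == False: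
--             indx_addr = line.index('Store_addr_value')
--             indx_name = line.index('Store_name_value')
--             if store_name_count > store_addr_count and first_company_line == index:
--                 line[indx_addr] = 'Store_name_value'
--             elif store_name_count < store_addr_count and first_company_line == index:
--                 line[indx_name] = 'Store_addr_value'
--             elif store_name_count == store_addr_count and first_company_line != index:
--                 line[indx_name] = 'Store_addr_value'
--             else :
--                 exit_loop = True
--
--     return lines_labels
-- ===== SOURCE B (Python) =====
-- def handle_store_name(lines_labels: list[list]):
--     # Pass 1: find the first line containing the token (fc), if any.
--     fc = None
--     for i, line in enumerate(lines_labels):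
--         if 'Store_name_value' in line:
--             fc = i
--             break
--     if fc is None:
--         return lines_labels
--     # Pass 2: in every line at least two past fc, relabel every token in place.
--     for line in lines_labels[fc + 2:]:
--         for j, tok in enumerate(line):
--             if tok == 'Store_name_value':
--                 line[j] = 'Others'
--     return lines_labels
-- ===== Notes on version B (the rewrite author's own statement) =====
-- stated objective: simpler
-- what changed: B replaces A's single intertwined loop (per-line while-loops with exit_loop flags, including a provably dead Store_addr_value while-loop) by two plain passes: find the index of the first line containing 'Store_name_value', then replace every occurrence of the token with 'Others' in the lines at least two past it.
import Mathlib
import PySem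

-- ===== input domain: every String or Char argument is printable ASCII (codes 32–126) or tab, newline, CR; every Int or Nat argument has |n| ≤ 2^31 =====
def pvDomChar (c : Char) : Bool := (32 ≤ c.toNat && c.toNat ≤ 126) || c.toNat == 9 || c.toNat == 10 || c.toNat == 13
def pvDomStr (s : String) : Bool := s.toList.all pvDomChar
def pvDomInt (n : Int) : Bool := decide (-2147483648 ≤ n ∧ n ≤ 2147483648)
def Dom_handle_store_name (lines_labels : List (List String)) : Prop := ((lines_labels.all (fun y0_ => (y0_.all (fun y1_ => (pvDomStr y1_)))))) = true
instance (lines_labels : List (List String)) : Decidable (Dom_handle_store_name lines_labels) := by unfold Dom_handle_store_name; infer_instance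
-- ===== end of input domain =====

-- B replaces A's single intertwined loop (with its dead Store_addr while-loop) by two plain
-- passes: find the first line containing the token, then relabel the suffix; objective: simpler.
-- Both Pythons mutate the inner lines in place and return the same outer list; the equivalence
-- proved here is about the RETURN value (B performs the same in-place mutation).

-- ===== PORT A =====

-- x ≠ t → replacing the first occurrence of t removes exactly one occurrence
theorem hsnCountSetIdxOf : ∀ (l : List String) (t v : String), t ∈ l → v ≠ t →
    (l.set (l.idxOf t) v).count t + 1 = l.count t := by
  intro l
  induction l with
  | nil => intro t v hm _; cases hm
  | cons x xs ih =>
    intro t v hm hv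
    by_cases hx : x = t
    · subst hx
      simp [hv]
    · have hm' : t ∈ xs := by
        cases hm with
        | head => exact absurd rfl hx
        | tail _ h => exact h
      have hbe : (x == t) = false := by simp [hx]
      simp [hx]
      exact ih t v hm' hv

-- while 'Store_name_value' in line and exit_loop == False: …
def hsnLoop1 (index : Nat) (fc : Option Nat) (line : List String) (exit_loop : Bool) :
    Option Nat × List String × Bool :=
  if h : "Store_name_value" ∈ line ∧ exit_loop = false then
    -- indx_store = line.index('Store_name_value'): exact under the guard's membership
    -- (PySem.List.index? = List.idxOf?, which is some (idxOf) here)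
    let indx_store := line.idxOf "Store_name_value"
    match fc with
    | none => hsnLoop1 index (some index) line exit_loop
    | some f =>
      if (index : Int) - (f : Int) ≥ 2 then
        hsnLoop1 index (some f) (line.set indx_store "Others") exit_loop
      else
        (some f, line, true)   -- exit_loop = True, loop re-checks and stops
  else (fc, line, exit_loop)
termination_by (if fc.isSome then 0 else 1) + line.count "Store_name_value"
decreasing_by
  · simp
  · have := hsnCountSetIdxOf line "Store_name_value" "Others" h.1 (by decide)
    simp
    omega

-- while 'Store_addr_value' in line and 'Store_name_value' in line and exit_loop == False: …
def hsnLoop2 (store_name_count store_addr_count : Nat) (fc : Option Nat) (index : Nat)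
    (line : List String) (exit_loop : Bool) : List String :=
  if h : "Store_addr_value" ∈ line ∧ "Store_name_value" ∈ line ∧ exit_loop = false then
    let indx_addr := line.idxOf "Store_addr_value"
    let indx_name := line.idxOf "Store_name_value"
    if h1 : store_name_count > store_addr_count ∧ fc = some index then
      hsnLoop2 store_name_count store_addr_count fc index
        (line.set indx_addr "Store_name_value") exit_loop
    else if h2 : store_name_count < store_addr_count ∧ fc = some index then
      hsnLoop2 store_name_count store_addr_count fc index
        (line.set indx_name "Store_addr_value") exit_loop
    else if h3 : store_name_count = store_addr_count ∧ fc ≠ some index then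
      hsnLoop2 store_name_count store_addr_count fc index
        (line.set indx_name "Store_addr_value") exit_loop
    else line
  else line
termination_by
  if store_name_count > store_addr_count then line.count "Store_addr_value"
  else line.count "Store_name_value"
decreasing_by
  · have := hsnCountSetIdxOf line "Store_addr_value" "Store_name_value" h.1 (by decide)
    simp [h1.1]
    omega
  · have := hsnCountSetIdxOf line "Store_name_value" "Store_addr_value" h.2.1 (by decide)
    have hng : ¬ store_name_count > store_addr_count := by omega
    simp [hng]
    omega
  · have := hsnCountSetIdxOf line "Store_name_value" "Store_addr_value" h.2.1 (by decide)
    have hng : ¬ store_name_count > store_addr_count := by omega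
    simp [hng]
    omega

-- one iteration of the for-loop body (line.count is PySem.List.count = List.count)
def hsnLine (index : Nat) (fc : Option Nat) (line : List String) : Option Nat × List String :=
  let store_name_count := line.count "Store_name_value"
  let store_addr_count := line.count "Store_addr_value"
  let r := hsnLoop1 index fc line false
  (r.1, hsnLoop2 store_name_count store_addr_count r.1 index r.2.1 r.2.2)

-- for index, line in enumerate(lines_labels): …  (lines mutated in place, the list is returned)
def hsnGo (index : Nat) (fc : Option Nat) : List (List String) → List (List String)
  | [] => []
  | line :: rest =>
    let r := hsnLine index fc line
    r.2 :: hsnGo (index + 1) r.1 rest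

def handle_store_name (lines_labels : List (List String)) : List (List String) :=
  hsnGo 0 none lines_labels

-- ===== PORT B =====

-- pass 1: index of the first line containing the token (None if absent)
def altFind : List (List String) → Option Nat
  | [] => none
  | line :: rest =>
    if "Store_name_value" ∈ line then some 0 else (altFind rest).map (· + 1)

-- pass 2 inner loop: for j, tok in enumerate(line): if tok == '…': line[j] = 'Others'
def altRepl (line : List String) : List String :=
  line.map (fun tok => if tok = "Store_name_value" then "Others" else tok)

def handle_store_name_alt (lines_labels : List (List String)) : List (List String) :=
  match altFind lines_labels with
  | none => lines_labels
  | some fc =>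
    lines_labels.take (fc + 2) ++ (lines_labels.drop (fc + 2)).map altRepl

-- ===== PRECONDITION & SPEC =====
def Spec_handle_store_name (lines_labels : List (List String)) (out : List (List String)) : Prop := out = handle_store_name_alt lines_labels
instance (lines_labels : List (List String)) (out : List (List String)) : Decidable (Spec_handle_store_name lines_labels out) := by unfold Spec_handle_store_name; infer_instance

-- ===== CLAIM (what is proved, stated in full; the proofs are below) =====
def Claim_equal_handle_store_name : Prop := ∀ (lines_labels : List (List String)), Dom_handle_store_name lines_labels → Spec_handle_store_name lines_labels (handle_store_name lines_labels)

-- ===== LEMMAS AND PROOFS =====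

theorem altRepl_of_not_mem (line : List String) (h : "Store_name_value" ∉ line) :
    altRepl line = line := by
  unfold altRepl
  rw [List.map_congr_left (g := id) ?_, List.map_id]
  intro x hx
  have hne : x ≠ "Store_name_value" := fun e => h (e ▸ hx)
  simp [hne]

theorem not_mem_altRepl (line : List String) : "Store_name_value" ∉ altRepl line := by
  intro hm
  rcases List.mem_map.mp hm with ⟨a, _, ha⟩
  by_cases h : a = "Store_name_value" <;> simp [h] at ha

-- replacing the first occurrence commutes with replacing them all
theorem altRepl_set : ∀ (l : List String), "Store_name_value" ∈ l →
    altRepl (l.set (l.idxOf "Store_name_value") "Others") = altRepl l := by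
  intro l
  induction l with
  | nil => intro hm; cases hm
  | cons x xs ih =>
    intro hm
    by_cases hx : x = "Store_name_value"
    · subst hx
      simp [altRepl]
    · have hm' : "Store_name_value" ∈ xs := by
        cases hm with
        | head => exact absurd rfl hx
        | tail _ h => exact h
      have hbe : (x == "Store_name_value") = false := by simp [hx]
      simp only [List.idxOf_cons, hbe, cond_false, List.set_cons_succ, altRepl, List.map_cons]
      have := ih hm'
      simp only [altRepl] at this
      rw [this]

theorem loop1_not_taken (i : Nat) (fc : Option Nat) (line : List String) (e : Bool)
    (h : ¬ ("Store_name_value" ∈ line ∧ e = false)) :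
    hsnLoop1 i fc line e = (fc, line, e) := by
  rw [hsnLoop1]; simp [h]

theorem loop1_first (i : Nat) (line : List String) (h : "Store_name_value" ∈ line) :
    hsnLoop1 i none line false = (some i, line, true) := by
  rw [hsnLoop1]
  simp only [h, and_self, dite_true]
  rw [hsnLoop1]
  simp [h]

theorem loop1_near (i f : Nat) (line : List String) (h : "Store_name_value" ∈ line)
    (h2 : ¬ ((i : Int) - (f : Int) ≥ 2)) :
    hsnLoop1 i (some f) line false = (some f, line, true) := by
  rw [hsnLoop1]
  simp [h, h2]

theorem loop1_far (i f : Nat) (h2 : (i : Int) - (f : Int) ≥ 2) :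
    ∀ (n : Nat) (line : List String), line.count "Store_name_value" = n →
      hsnLoop1 i (some f) line false = (some f, altRepl line, false) := by
  intro n
  induction n using Nat.strong_induction_on with
  | _ n ih =>
    intro line hc
    by_cases hm : "Store_name_value" ∈ line
    · rw [hsnLoop1]
      simp only [hm, and_self, dite_true, if_pos h2]
      have hcnt := hsnCountSetIdxOf line "Store_name_value" "Others" hm (by decide)
      rw [ih _ (by omega) _ rfl, altRepl_set line hm]
    · rw [hsnLoop1]
      simp [hm, altRepl_of_not_mem line hm]

theorem loop2_skip (snc sac : Nat) (fc : Option Nat) (i : Nat) (line : List String) (e : Bool)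
    (h : ¬ ("Store_addr_value" ∈ line ∧ "Store_name_value" ∈ line ∧ e = false)) :
    hsnLoop2 snc sac fc i line e = line := by
  rw [hsnLoop2]; simp [h]

theorem hsnLine_not_mem (i : Nat) (fc : Option Nat) (line : List String)
    (h : "Store_name_value" ∉ line) : hsnLine i fc line = (fc, line) := by
  unfold hsnLine
  rw [loop1_not_taken i fc line false (by simp [h])]
  dsimp only
  rw [loop2_skip _ _ _ _ _ _ (by simp [h])]

theorem hsnLine_first (i : Nat) (line : List String) (h : "Store_name_value" ∈ line) :
    hsnLine i none line = (some i, line) := by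
  unfold hsnLine
  rw [loop1_first i line h]
  dsimp only
  rw [loop2_skip _ _ _ _ _ _ (by simp)]

theorem hsnLine_near (i f : Nat) (line : List String) (h2 : ¬ ((i : Int) - (f : Int) ≥ 2)) :
    hsnLine i (some f) line = (some f, line) := by
  unfold hsnLine
  by_cases hm : "Store_name_value" ∈ line
  · rw [loop1_near i f line hm h2]
    dsimp only
    rw [loop2_skip _ _ _ _ _ _ (by simp)]
  · rw [loop1_not_taken i (some f) line false (by simp [hm])]
    dsimp only
    rw [loop2_skip _ _ _ _ _ _ (by simp [hm])]

theorem hsnLine_far (i f : Nat) (line : List String) (h2 : (i : Int) - (f : Int) ≥ 2) :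
    hsnLine i (some f) line = (some f, altRepl line) := by
  unfold hsnLine
  by_cases hm : "Store_name_value" ∈ line
  · rw [loop1_far i f h2 _ line rfl]
    dsimp only
    rw [loop2_skip _ _ _ _ _ _ (by simp [not_mem_altRepl line])]
  · rw [loop1_not_taken i (some f) line false (by simp [hm])]
    dsimp only
    rw [loop2_skip _ _ _ _ _ _ (by simp [hm])]
    rw [altRepl_of_not_mem line hm]

theorem hsnGo_far (f : Nat) : ∀ (ls : List (List String)) (i : Nat),
    (f : Int) + 2 ≤ (i : Int) → hsnGo i (some f) ls = ls.map altRepl := by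
  intro ls
  induction ls with
  | nil => intro i _; rfl
  | cons line rest ih =>
    intro i hi
    show (hsnLine i (some f) line).2 :: hsnGo (i + 1) (hsnLine i (some f) line).1 rest = _
    rw [hsnLine_far i f line (by omega)]
    rw [List.map_cons, ih (i + 1) (by push_cast; omega)]

theorem hsnGo_after (f : Nat) (ls : List (List String)) :
    hsnGo (f + 1) (some f) ls = ls.take 1 ++ (ls.drop 1).map altRepl := by
  cases ls with
  | nil => rfl
  | cons line rest =>
    show (hsnLine (f + 1) (some f) line).2 ::
        hsnGo (f + 1 + 1) (hsnLine (f + 1) (some f) line).1 rest = _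
    rw [hsnLine_near (f + 1) f line (by push_cast; omega)]
    rw [hsnGo_far f rest (f + 1 + 1) (by push_cast; omega)]
    simp

theorem hsnGo_none : ∀ (ls : List (List String)) (i : Nat),
    hsnGo i none ls = handle_store_name_alt ls := by
  intro ls
  induction ls with
  | nil => intro i; rfl
  | cons line rest ih =>
    intro i
    show (hsnLine i none line).2 :: hsnGo (i + 1) (hsnLine i none line).1 rest = _
    by_cases hm : "Store_name_value" ∈ line
    · rw [hsnLine_first i line hm]
      rw [hsnGo_after i rest]
      unfold handle_store_name_alt altFind
      simp [hm]
    · rw [hsnLine_not_mem i none line hm]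
      rw [ih (i + 1)]
      unfold handle_store_name_alt
      show _ = match altFind (line :: rest) with
        | none => line :: rest
        | some fc => (line :: rest).take (fc + 2) ++ ((line :: rest).drop (fc + 2)).map altRepl
      have hstep : altFind (line :: rest) = if "Store_name_value" ∈ line then some 0
          else (altFind rest).map (· + 1) := rfl
      rw [hstep, if_neg hm]
      cases haf : altFind rest with
      | none => simp
      | some k => simp [List.take_succ_cons, List.drop_succ_cons]

-- ===== VERDICT (by name: the statement is the Claim_ definition above) =====
theorem handle_store_name_spec : Claim_equal_handle_store_name := by
  intro ls _
  unfold Spec_handle_store_name handle_store_name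
  exact hsnGo_none ls 0
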